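-- pv_equiv track=rewrite | github.com/republicroad/zen-rule | src/function_call_parse.py | parse_func_arguments
-- ===== SOURCE A (Python) =====
-- FUNC_LEFT_BOUNDRY = "("
--
-- def parse_func_arguments(stack):
--     stop_chars = (FUNC_LEFT_BOUNDRY,)
--     l = []
--     c = ""
--     while(stack and c not in stop_chars):
--         c = stack.pop()
--         l.append(c)
--     if stack:
--         # pop function name
--         l.append(stack.pop())
--     l.reverse()
--     # logger.debug("token:", token)
--     return l
-- ===== SOURCE B (Python) =====
-- def parse_func_arguments(stack):
--     if "(" in stack:
--         i = len(stack) - 1 - stack[::-1].index("(")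
--         j = max(i - 1, 0)
--         seg = stack[j:]
--         del stack[j:]
--         return seg
--     seg = stack[:]
--     del stack[:]
--     return seg
-- ===== Notes on version B (the rewrite author's own statement) =====
-- stated objective: simpler
-- what changed: B replaces A's pop-one-token-at-a-time loop with final list reversal by a single reverse-index lookup of the last '(' followed by one slice (taken and deleted in place), returning the segment already in order.
import Mathlib
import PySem

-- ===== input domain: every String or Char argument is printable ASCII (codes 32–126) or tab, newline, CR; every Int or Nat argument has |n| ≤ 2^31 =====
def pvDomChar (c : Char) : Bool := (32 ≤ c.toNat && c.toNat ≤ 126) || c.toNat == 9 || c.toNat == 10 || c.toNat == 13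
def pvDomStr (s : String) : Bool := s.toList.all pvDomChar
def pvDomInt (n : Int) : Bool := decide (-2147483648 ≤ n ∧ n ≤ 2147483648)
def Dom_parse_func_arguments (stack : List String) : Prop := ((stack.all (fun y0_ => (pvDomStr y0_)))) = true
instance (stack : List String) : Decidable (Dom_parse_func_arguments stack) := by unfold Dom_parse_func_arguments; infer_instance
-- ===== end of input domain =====

-- B locates the last "(" by one reverse-index lookup and returns/removes a single slice
-- instead of A's pop-one-append-one loop with a final reverse (objective: simpler).
-- Both Pythons mutate `stack` identically (B via del); the theorems are about the return value.

-- ===== PORT A =====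
-- the while loop: state (stack, l, c); stack.pop() = getLast?, l.append = ++ [·]
def parseLoopA (stack l : List String) (c : String) : List String × List String :=
  if c ∈ (["("] : List String) then (stack, l)
  else
    match hs : stack.getLast? with
    | some c' => parseLoopA stack.dropLast (l ++ [c']) c'
    | none => (stack, l)
termination_by stack.length
decreasing_by
  have hne : stack ≠ [] := by intro h; simp [h] at hs
  have := List.length_pos_of_ne_nil hne
  simp only [List.length_dropLast]
  omega

def parse_func_arguments (stack : List String) : List String :=
  let p := parseLoopA stack [] ""
  let l :=
    match p.1.getLast? with   -- if stack: l.append(stack.pop())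
    | some name => p.2 ++ [name]
    | none => p.2
  l.reverse

-- ===== PORT B =====
def parse_func_arguments_alt (stack : List String) : List String :=
  if "(" ∈ stack then
    -- stack[::-1].index("(")  (stack[::-1] = stack.reverse by PySem.List.slice?_none_none_neg_one)
    match PySem.List.index? stack.reverse "(" with
    | some k =>
      let i : Int := (stack.length : Int) - 1 - (k : Int)
      let j : Int := max (i - 1) 0
      PySem.List.slice stack (some j) none   -- seg = stack[j:]
    | none => []  -- unreachable: guarded by the membership test
  else stack      -- seg = stack[:]

-- ===== PRECONDITION & SPEC =====
def Spec_parse_func_arguments (stack : List String) (out : List String) : Prop := out = parse_func_arguments_alt stack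
instance (stack : List String) (out : List String) : Decidable (Spec_parse_func_arguments stack out) := by unfold Spec_parse_func_arguments; infer_instance

-- ===== CLAIM (what is proved, stated in full; the proofs are below) =====
def Claim_equal_parse_func_arguments : Prop := ∀ (stack : List String), Dom_parse_func_arguments stack → Spec_parse_func_arguments stack (parse_func_arguments stack)

-- ===== LEMMAS AND PROOFS =====

theorem loopA_nil (l : List String) (c : String) : parseLoopA [] l c = ([], l) := by
  rw [parseLoopA]; split <;> simp

theorem loopA_stop (s l : List String) : parseLoopA s l "(" = (s, l) := by
  rw [parseLoopA]; simp

theorem loopA_step (ys : List String) (x : String) (l : List String) (c : String)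
    (hc : c ≠ "(") : parseLoopA (ys ++ [x]) l c = parseLoopA ys (l ++ [x]) x := by
  rw [parseLoopA, if_neg (by simp [hc])]
  split
  · rename_i c' hs
    rw [List.getLast?_concat] at hs
    injection hs with h; subst h
    rw [List.dropLast_concat]
  · rename_i hs
    rw [List.getLast?_concat] at hs
    simp at hs

theorem loopA_c_irrel (s l : List String) (c c' : String) (hc : c ≠ "(") (hc' : c' ≠ "(") :
    parseLoopA s l c = parseLoopA s l c' := by
  cases s using List.reverseRecOn with
  | nil => rw [loopA_nil, loopA_nil]
  | append_singleton ys x => rw [loopA_step ys x l c hc, loopA_step ys x l c' hc']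

theorem loopA_acc (s : List String) : ∀ (l : List String) (c : String),
    parseLoopA s l c = ((parseLoopA s [] c).1, l ++ (parseLoopA s [] c).2) := by
  induction s using List.reverseRecOn with
  | nil => intro l c; rw [loopA_nil, loopA_nil]; simp
  | append_singleton ys x ih =>
    intro l c
    by_cases hc : c = "("
    · subst hc; rw [loopA_stop, loopA_stop]; simp
    · rw [loopA_step ys x l c hc, loopA_step ys x [] c hc]
      simp only [List.nil_append]
      rw [ih (l ++ [x]) x, ih [x] x]
      simp

theorem A_concat_paren (ys : List String) :
    parse_func_arguments (ys ++ ["("]) =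
      (match ys.getLast? with | some n => [n, "("] | none => ["("]) := by
  unfold parse_func_arguments
  rw [loopA_step ys "(" [] "" (by decide), loopA_stop]
  cases h : ys.getLast? <;> simp [h]

theorem A_concat_ne (ys : List String) (x : String) (hx : x ≠ "(") :
    parse_func_arguments (ys ++ [x]) = parse_func_arguments ys ++ [x] := by
  unfold parse_func_arguments
  rw [loopA_step ys x [] "" (by decide)]
  simp only [List.nil_append]
  rw [loopA_c_irrel ys [x] x "" hx (by decide), loopA_acc ys [x] ""]
  cases h : (parseLoopA ys [] "").1.getLast? <;> simp

theorem alt_concat_paren (ys : List String) :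
    parse_func_arguments_alt (ys ++ ["("]) =
      (match ys.getLast? with | some n => [n, "("] | none => ["("]) := by
  unfold parse_func_arguments_alt
  have hmem : "(" ∈ ys ++ ["("] := by simp
  rw [if_pos hmem]
  have hrev : (ys ++ ["("]).reverse = "(" :: ys.reverse := by simp
  rw [hrev, PySem.List.index?_cons_self]
  cases ys using List.reverseRecOn with
  | nil =>
    simp [PySem.List.slice]
  | append_singleton zs n =>
    simp only []
    have hj : max (((zs ++ [n] ++ ["("] : List String).length : Int) - 1 - ((0:Nat):Int) - 1) 0
        = ((zs.length : Nat) : Int) := by simp; omega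
    rw [hj, PySem.List.slice_from_natCast]
    rw [List.append_assoc, List.drop_left]
    simp

theorem alt_concat_ne (ys : List String) (x : String) (hx : x ≠ "(") :
    parse_func_arguments_alt (ys ++ [x]) = parse_func_arguments_alt ys ++ [x] := by
  by_cases hmem : "(" ∈ ys
  · unfold parse_func_arguments_alt
    have hmem' : "(" ∈ ys ++ [x] := by simp [hmem]
    rw [if_pos hmem', if_pos hmem]
    obtain ⟨k, hk⟩ : ∃ k, PySem.List.index? ys.reverse "(" = some k := by
      cases h : PySem.List.index? ys.reverse "(" with
      | none => exact absurd ((PySem.List.index?_eq_none_iff _ _).mp h) (by simpa using hmem)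
      | some k => exact ⟨k, rfl⟩
    obtain ⟨hlt, -, -⟩ := PySem.List.getElem_of_index?_eq_some hk
    rw [List.length_reverse] at hlt
    have hrev : (ys ++ [x]).reverse = x :: ys.reverse := by simp
    rw [hrev, PySem.List.index?_cons_of_ne ys.reverse hx, hk]
    simp only [Option.map_some]
    have hj' : max ((((ys ++ [x] : List String)).length : Int) - 1 - ((k + 1 : Nat) : Int) - 1) 0
        = ((ys.length - k - 2 : Nat) : Int) := by simp; omega
    have hj : max (((ys.length : Int)) - 1 - ((k : Nat) : Int) - 1) 0
        = ((ys.length - k - 2 : Nat) : Int) := by omega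
    rw [hj', hj, PySem.List.slice_from_natCast, PySem.List.slice_from_natCast,
      List.drop_append_of_le_length (by omega)]
  · have hmem' : "(" ∉ ys ++ [x] := by
      simp [hmem]; intro h; exact hx h.symm
    unfold parse_func_arguments_alt
    rw [if_neg hmem', if_neg hmem]

theorem A_eq_alt (s : List String) : parse_func_arguments s = parse_func_arguments_alt s := by
  induction s using List.reverseRecOn with
  | nil =>
    unfold parse_func_arguments parse_func_arguments_alt
    rw [loopA_nil]; simp
  | append_singleton ys x ih =>
    by_cases hx : x = "("
    · subst hx; rw [A_concat_paren, alt_concat_paren]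
    · rw [A_concat_ne ys x hx, alt_concat_ne ys x hx, ih]

-- ===== VERDICT (by name: the statement is the Claim_ definition above) =====
theorem parse_func_arguments_spec : Claim_equal_parse_func_arguments := by
  intro stack _
  unfold Spec_parse_func_arguments
  exact A_eq_alt stack
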